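-- pv_equiv track=rewrite | github.com/chrisglencross/advent-of-code | aoc2021/day24/day24-as-python.py | toBase26
-- ===== SOURCE A (Python) =====
-- def toBase26(n):
--     if n == 0:
--         return "0"
--     digits = []
--     while n:
--         digits.append(str(int(n % 26)))
--         n //= 26
--     return "_".join(digits[::-1])
-- ===== SOURCE B (Python) =====
-- def toBase26(n):
--     if n == 0:
--         return "0"
--     p = 1
--     while p * 26 <= n:
--         p *= 26
--     parts = []
--     while p:
--         parts.append(str((n // p) % 26))
--         n %= p
--         p //= 26
--     return "_".join(parts)
-- ===== Notes on version B (the rewrite author's own statement) =====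
-- stated objective: alternative
-- what changed: B finds the highest power of 26 <= n first and then emits digits most-significant-first with a running place value, instead of A's accumulate-remainders-then-reverse loop; Pre_ excludes n < 0, where A's while loop never terminates (n //= 26 stalls at -1).
import Mathlib
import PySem

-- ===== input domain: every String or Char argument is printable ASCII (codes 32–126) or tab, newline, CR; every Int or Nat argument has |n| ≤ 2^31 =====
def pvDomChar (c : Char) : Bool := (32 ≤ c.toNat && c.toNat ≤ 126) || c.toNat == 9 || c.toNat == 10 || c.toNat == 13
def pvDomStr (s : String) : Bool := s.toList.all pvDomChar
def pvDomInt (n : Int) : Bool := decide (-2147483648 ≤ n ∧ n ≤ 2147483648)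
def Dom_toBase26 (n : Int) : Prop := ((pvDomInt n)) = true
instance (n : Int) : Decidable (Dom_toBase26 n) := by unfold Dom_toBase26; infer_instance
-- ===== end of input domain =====

-- B emits base-26 digits most-significant-first with a running place value (no reversal);
-- equivalence is claimed on n ≥ 0 (Pre_), since A's while loop never terminates for n < 0.

-- ===== PORT A =====
-- A's while loop, run on n.toNat (exact for the admitted n ≥ 0; for n < 0 Python A diverges).
def toBase26LoopA (n : Nat) (digits : List String) : List String :=
  if n = 0 then digits
  else toBase26LoopA (n / 26) (digits ++ [PySem.Int.toStr ((n % 26 : Nat) : Int)])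
termination_by n
decreasing_by exact Nat.div_lt_self (by omega) (by omega)

def toBase26 (n : Int) : String :=
  if n = 0 then "0"
  else PySem.Str.join "_" ((toBase26LoopA n.toNat []).reverse)  -- digits[::-1]

-- ===== PORT B =====
-- first while loop of B: grow p by *26 while p*26 <= n  (exact for n ≥ 0)
def growP (n p : Nat) (hp : 0 < p) : Nat :=
  if p * 26 ≤ n then growP n (p * 26) (by omega) else p
termination_by n - p
decreasing_by omega

-- second while loop of B: emit str((n//p)%26), then n %= p, p //= 26
def bLoopB (n p : Nat) : List String :=
  if p = 0 then []
  else PySem.Int.toStr ((n / p % 26 : Nat) : Int) :: bLoopB (n % p) (p / 26)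
termination_by p
decreasing_by exact Nat.div_lt_self (by omega) (by omega)

def toBase26_alt (n : Int) : String :=
  if n = 0 then "0"
  else PySem.Str.join "_" (bLoopB n.toNat (growP n.toNat 1 (by omega)))

-- ===== PRECONDITION & SPEC =====
-- Pre_ excludes n < 0: there Python A never returns (n //= 26 stalls at -1, the while loop spins forever).
def Pre_toBase26 (n : Int) : Prop := 0 ≤ n
instance (n : Int) : Decidable (Pre_toBase26 n) := by unfold Pre_toBase26; infer_instance
def pvWitness_toBase26 : Int := (703)

def Spec_toBase26 (n : Int) (out : String) : Prop := out = toBase26_alt n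
instance (n : Int) (out : String) : Decidable (Spec_toBase26 n out) := by unfold Spec_toBase26; infer_instance

-- ===== CLAIM (what is proved, stated in full; the proofs are below) =====
def Claim_equal_toBase26 : Prop := ∀ (n : Int), Dom_toBase26 n → Pre_toBase26 n → Spec_toBase26 n (toBase26 n)

-- ===== LEMMAS AND PROOFS =====

-- LSB-first digit list of m (the values A's loop appends)
def digitsLSB (m : Nat) : List Nat :=
  if m = 0 then [] else m % 26 :: digitsLSB (m / 26)
termination_by m
decreasing_by exact Nat.div_lt_self (by omega) (by omega)

-- exactly k+1 LSB-first digits of m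
def padDigits : Nat → Nat → List Nat
  | 0, m => [m % 26]
  | (k+1), m => m % 26 :: padDigits k (m / 26)

theorem loopA_eq (m : Nat) : ∀ ds, toBase26LoopA m ds = ds ++ (digitsLSB m).map (fun d => PySem.Int.toStr (Int.ofNat d)) := by
  induction m using Nat.strong_induction_on with
  | _ m ih =>
    intro ds
    unfold toBase26LoopA digitsLSB
    by_cases h : m = 0
    · simp [h]
    · simp only [h, if_false]
      rw [ih (m / 26) (Nat.div_lt_self (by omega) (by omega))]
      simp

theorem padDigits_split (k : Nat) : ∀ m, padDigits (k+1) m = padDigits k (m % 26^(k+1)) ++ [m / 26^(k+1) % 26] := by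
  induction k with
  | zero =>
    intro m
    simp [padDigits, pow_one]
  | succ k ih =>
    intro m
    show m % 26 :: padDigits (k+1) (m / 26) = padDigits (k+1) (m % 26^(k+2)) ++ [m / 26^(k+2) % 26]
    rw [ih (m / 26)]
    have h1 : m % 26 ^ (k + 2) % 26 = m % 26 := by
      exact Nat.mod_mod_of_dvd m (dvd_pow_self 26 (by omega))
    have h2 : m % 26 ^ (k + 2) / 26 = m / 26 % 26 ^ (k + 1) := by
      have : (26:Nat) ^ (k+2) = 26 * 26 ^ (k+1) := by ring
      rw [this, Nat.mod_mul_right_div_self]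
    have h3 : m / 26 / 26 ^ (k + 1) = m / 26 ^ (k + 2) := by
      rw [Nat.div_div_eq_div_mul]
      congr 1
      ring
    show m % 26 :: (padDigits k (m / 26 % 26 ^ (k + 1)) ++ [m / 26 / 26 ^ (k + 1) % 26])
        = (m % 26 ^ (k + 2) % 26 :: padDigits k (m % 26 ^ (k + 2) / 26)) ++ [m / 26 ^ (k + 2) % 26]
    rw [h1, h2, h3]
    simp

theorem bLoopB_eq (k : Nat) : ∀ m, bLoopB m (26 ^ k) = ((padDigits k m).reverse).map (fun d => PySem.Int.toStr (Int.ofNat d)) := by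
  induction k with
  | zero =>
    intro m
    unfold bLoopB
    simp [padDigits]
    unfold bLoopB
    simp
  | succ k ih =>
    intro m
    unfold bLoopB
    have hp : (26:Nat) ^ (k+1) ≠ 0 := by positivity
    simp only [hp, if_false]
    have hdiv : (26:Nat) ^ (k+1) / 26 = 26 ^ k := by
      rw [pow_succ]
      exact Nat.mul_div_cancel _ (by omega)
    rw [hdiv, ih (m % 26 ^ (k+1)), padDigits_split]
    simp

theorem digitsLSB_eq_padDigits (k : Nat) : ∀ m, 26 ^ k ≤ m → m < 26 ^ (k+1) → digitsLSB m = padDigits k m := by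
  induction k with
  | zero =>
    intro m h1 h2
    unfold digitsLSB
    have hm : m ≠ 0 := by simpa using Nat.one_le_iff_ne_zero.mp (by simpa using h1)
    simp only [hm, if_false]
    have : m / 26 = 0 := Nat.div_eq_of_lt (by simpa using h2)
    rw [this]
    unfold digitsLSB
    simp [padDigits]
  | succ k ih =>
    intro m h1 h2
    have hm : m ≠ 0 := by
      have : 0 < (26:Nat) ^ (k+1) := by positivity
      omega
    unfold digitsLSB
    simp only [hm, if_false]
    have hlo : 26 ^ k ≤ m / 26 := by
      rw [Nat.le_div_iff_mul_le (by omega)]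
      calc 26 ^ k * 26 = 26 ^ (k+1) := by ring
        _ ≤ m := h1
    have hhi : m / 26 < 26 ^ (k+1) := by
      rw [Nat.div_lt_iff_lt_mul (by omega)]
      calc m < 26 ^ (k+2) := h2
        _ = 26 ^ (k+1) * 26 := by ring
    rw [ih (m / 26) hlo hhi]
    rfl

theorem growP_spec (n p : Nat) (hp : 0 < p) (hpn : p ≤ n) :
    ∃ k, growP n p hp = p * 26 ^ k ∧ p * 26 ^ k ≤ n ∧ n < p * 26 ^ (k+1) := by
  unfold growP
  by_cases h : p * 26 ≤ n
  · obtain ⟨k, hk1, hk2, hk3⟩ := growP_spec n (p * 26) (by omega) h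
    refine ⟨k + 1, ?_, ?_, ?_⟩
    · simp only [h, if_true]
      rw [hk1]; ring
    · calc p * 26 ^ (k+1) = p * 26 * 26 ^ k := by ring
        _ ≤ n := hk2
    · calc n < p * 26 * 26 ^ (k+1) := hk3
        _ = p * 26 ^ (k+2) := by ring
  · refine ⟨0, ?_, by simpa, ?_⟩
    · simp [h]
    · simpa [pow_one] using Nat.lt_of_not_le h
termination_by n - p
decreasing_by omega

-- ===== VERDICT (by name: the statement is the Claim_ definition above) =====
theorem toBase26_spec : Claim_equal_toBase26 := by
  intro n _ hpre
  unfold Pre_toBase26 at hpre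
  unfold Spec_toBase26 toBase26 toBase26_alt
  by_cases h0 : n = 0
  · simp [h0]
  · simp only [h0, if_false]
    set m := n.toNat with hm
    have hm1 : 1 ≤ m := by omega
    obtain ⟨k, hk1, hk2, hk3⟩ := growP_spec m 1 (by omega) hm1
    simp only [one_mul] at hk1 hk2 hk3
    rw [hk1, bLoopB_eq, ← digitsLSB_eq_padDigits k m hk2 hk3, loopA_eq]
    simp only [List.nil_append]
    rw [List.map_reverse]
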